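-- pv_equiv track=rewrite | github.com/wf9a5m75/leetcode | combination-sum-iii/solution1.py | combinationSum3
-- ===== SOURCE A (Python) =====
-- from typing import List
--
-- def combinationSum3(k: int, n: int) -> List[List[int]]:
--     ans = []
--
--     def backtracking(path, remain, curr):
--         if len(path) == k:
--             if remain == 0:
--                 ans.append(path.copy())
--             return
--         for i in range(curr + 1, 10):
--             if remain - i >= 0:
--                 path.append(i)
--                 backtracking(path, remain - i, i)
--                 path.pop()
--     backtracking([], n, 0)
--
--     return ans
-- ===== SOURCE B (Python) =====
-- from typing import List
--
-- def combinationSum3(k: int, n: int) -> List[List[int]]: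
--     # Build all strictly-ascending digit lists over 1..9 iteratively (lex order),
--     # then keep those of length k summing to n.
--     subs = [[]]  # ascending lists with all elements > 9 (just the empty list)
--     for d in range(9, 0, -1):
--         # ascending lists with elements > d-1:
--         # [] first, then those starting with d, then the nonempty ones with elements > d
--         subs = [[]] + [[d] + t for t in subs] + subs[1:]
--     return [l for l in subs if len(l) == k and sum(l) == n]
-- ===== Notes on version B (the rewrite author's own statement) =====
-- stated objective: alternative
-- what changed: Replaces the recursive pruned backtracking (mutable path/remain/curr state with append/pop) by an iterative bottom-up construction of all 512 strictly-ascending digit lists in lexicographic order followed by a single filter on length and sum.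
import Mathlib
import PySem

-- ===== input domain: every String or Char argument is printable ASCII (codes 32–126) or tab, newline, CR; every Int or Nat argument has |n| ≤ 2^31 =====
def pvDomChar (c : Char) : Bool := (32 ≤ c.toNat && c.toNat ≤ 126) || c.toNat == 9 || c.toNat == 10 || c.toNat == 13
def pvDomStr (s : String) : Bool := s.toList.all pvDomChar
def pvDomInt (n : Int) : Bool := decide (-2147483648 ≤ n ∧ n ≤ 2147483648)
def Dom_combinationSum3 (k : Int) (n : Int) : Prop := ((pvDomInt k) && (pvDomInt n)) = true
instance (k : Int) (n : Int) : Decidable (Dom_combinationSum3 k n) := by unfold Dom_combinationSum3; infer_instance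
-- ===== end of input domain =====

-- B replaces A's recursive pruned backtracking by an iterative bottom-up generation of all
-- ascending digit lists (lex order) plus one filter; same cost class, no speed claim.

-- ===== PORT A =====
-- backtracking(path, remain, curr); ans is threaded functionally; fuel is a totality guard on
-- the recursion depth (curr strictly increases and stays < 10, so fuel 10 at the top call is
-- never exhausted).
def pvBT (k : Int) (fuel : Nat) (p : List Int) (r : Int) (c : Int) (ans : List (List Int)) : List (List Int) :=
  match fuel with
  | 0 => ans
  | fuel + 1 =>
    if (p.length : Int) = k then
      (if r = 0 then ans ++ [p] else ans)
    else
      (PySem.List.pyRange (c + 1) 10 1).foldl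
        (fun ans i => if r - i ≥ 0 then pvBT k fuel (p ++ [i]) (r - i) i ans else ans) ans

def combinationSum3 (k : Int) (n : Int) : List (List Int) :=
  pvBT k 10 [] n 0 []

-- ===== PORT B =====
def combinationSum3_alt (k : Int) (n : Int) : List (List Int) :=
  let subs := (PySem.List.pyRange 9 0 (-1)).foldl
    (fun subs d => [[]] ++ subs.map (fun t => [d] ++ t) ++ PySem.List.slice subs (some 1) none)
    [[]]
  subs.filter (fun l => decide ((l.length : Int) = k ∧ l.sum = n))

-- ===== PRECONDITION & SPEC =====
def Spec_combinationSum3 (k : Int) (n : Int) (out : List (List Int)) : Prop := out = combinationSum3_alt k n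
instance (k : Int) (n : Int) (out : List (List Int)) : Decidable (Spec_combinationSum3 k n out) := by unfold Spec_combinationSum3; infer_instance

-- ===== CLAIM (what is proved, stated in full; the proofs are below) =====
def Claim_equal_combinationSum3 : Prop := ∀ (k : Int) (n : Int), Dom_combinationSum3 k n → Spec_combinationSum3 k n (combinationSum3 k n)

-- ===== LEMMAS AND PROOFS =====

-- all strictly-ascending lists over digits (c, 9], in A's traversal (lex) order
def pvExt (fuel : Nat) (c : Int) : List (List Int) :=
  match fuel with
  | 0 => []
  | fuel + 1 =>
    [] :: ((PySem.List.pyRange (c + 1) 10 1).map (fun i => (pvExt fuel i).map (fun t => i :: t))).flatten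

lemma pvExt_mem_succ {fuel : Nat} {c : Int} {t : List Int}
    (ht : t ∈ pvExt (fuel + 1) c) :
    t = [] ∨ ∃ i u, i ∈ PySem.List.pyRange (c + 1) 10 1 ∧ u ∈ pvExt fuel i ∧ t = i :: u := by
  simp only [pvExt, List.mem_cons, List.mem_flatten, List.mem_map] at ht
  rcases ht with rfl | ⟨L, ⟨i, hi, rfl⟩, ht⟩
  · exact Or.inl rfl
  · rw [List.mem_map] at ht
    rcases ht with ⟨u, hu, rfl⟩
    exact Or.inr ⟨i, u, hi, hu, rfl⟩

lemma pvExt_sum_nonneg : ∀ (fuel : Nat) (c : Int), 0 ≤ c → ∀ t ∈ pvExt fuel c, 0 ≤ t.sum := by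
  intro fuel
  induction fuel with
  | zero => intro c _ t ht; simp [pvExt] at ht
  | succ fuel ih =>
    intro c hc t ht
    rcases pvExt_mem_succ ht with rfl | ⟨i, u, hi, hu, rfl⟩
    · simp
    · have hib := PySem.List.mem_pyRange_one.mp hi
      have := ih i (by omega) u hu
      simp only [List.sum_cons]
      omega

lemma pvBT_eq (k : Int) : ∀ (fuel : Nat) (c : Int), 0 ≤ c → ∀ (p : List Int) (r : Int) (ans : List (List Int)),
    pvBT k fuel p r c ans =
      ans ++ ((pvExt fuel c).filter
        (fun l => decide (((p.length : Int) + l.length = k) ∧ l.sum = r))).map (fun l => p ++ l) := by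
  intro fuel
  induction fuel with
  | zero => intro c _ p r ans; simp [pvBT, pvExt]
  | succ fuel ih =>
    intro c hc p r ans
    by_cases hp : (p.length : Int) = k
    · -- len(path) == k: only the empty extension survives the filter
      have hflat : ((((PySem.List.pyRange (c + 1) 10 1).map
          (fun i => (pvExt fuel i).map (fun t => i :: t))).flatten).filter
          (fun l => decide (((p.length : Int) + l.length = k) ∧ l.sum = r))) = [] := by
        apply List.filter_eq_nil_iff.mpr
        intro l hl
        simp only [List.mem_flatten, List.mem_map] at hl
        rcases hl with ⟨L, ⟨i, hi, rfl⟩, hl⟩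
        rw [List.mem_map] at hl
        rcases hl with ⟨u, hu, rfl⟩
        simp only [decide_eq_true_eq, not_and]
        intro hlen
        exfalso
        simp only [List.length_cons] at hlen
        omega
      simp only [pvBT]
      rw [if_pos hp]
      simp only [pvExt, List.filter_cons, hflat]
      by_cases hr : r = 0
      · simp [hr, hp]
      · simp [hr, hp, Ne.symm hr]
    · -- len(path) != k: the for-loop over range(curr+1, 10)
      simp only [pvBT]
      rw [if_neg hp]
      have hfold := PySem.List.foldl_congr_mem
        (l := PySem.List.pyRange (c + 1) 10 1) (init := ans)
        (f := fun ans i => if r - i ≥ 0 then pvBT k fuel (p ++ [i]) (r - i) i ans else ans)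
        (g := fun ans i => ans ++
          ((pvExt fuel i).filter
            (fun l => decide ((((p ++ [i]).length : Int) + l.length = k) ∧ l.sum = r - i))).map
            (fun l => (p ++ [i]) ++ l))
        (by
          intro acc i hi
          have hib := PySem.List.mem_pyRange_one.mp hi
          simp only
          by_cases hri : r - i ≥ 0
          · rw [if_pos hri]
            exact ih i (by omega) (p ++ [i]) (r - i) acc
          · rw [if_neg hri]
            have hnil : ((pvExt fuel i).filter
                (fun l => decide ((((p ++ [i]).length : Int) + l.length = k) ∧ l.sum = r - i))) = [] := by
              apply List.filter_eq_nil_iff.mpr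
              intro t ht
              have hs := pvExt_sum_nonneg fuel i (by omega) t ht
              simp only [decide_eq_true_eq, not_and]
              intro _
              omega
            rw [hnil]
            simp)
      rw [hfold]
      rw [PySem.List.foldl_append_eq_flatMap]
      congr 1
      -- RHS head []: dropped since p.length ≠ k
      have hnil : (decide ((((p.length : Int) + (([] : List Int)).length = k) ∧ (([] : List Int)).sum = r))) = false := by
        simp only [List.length_nil, List.sum_nil, Nat.cast_zero, add_zero, decide_eq_false_iff_not, not_and]
        intro h
        exact absurd h hp
      simp only [pvExt, List.filter_cons, hnil, Bool.false_eq_true, if_false]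
      rw [List.flatMap_def, List.filter_flatten]
      rw [List.map_flatten, List.map_map, List.map_map]
      congr 1
      apply List.map_congr_left
      intro i hi
      simp only [Function.comp]
      rw [List.filter_map, List.map_map]
      have hfeq : ((pvExt fuel i).filter ((fun l => decide (((p.length : Int) + l.length = k) ∧ l.sum = r)) ∘ (fun t => i :: t)))
          = ((pvExt fuel i).filter (fun l => decide ((((p ++ [i]).length : Int) + l.length = k) ∧ l.sum = r - i))) := by
        apply List.filter_congr
        intro t _
        simp only [Function.comp, List.length_cons, List.length_nil, List.sum_cons,
          List.length_append, decide_eq_decide]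
        push_cast
        constructor <;> (intro ⟨h1, h2⟩; exact ⟨by omega, by omega⟩)
      rw [hfeq]
      apply List.map_congr_left
      intro t _
      simp

-- B's iterative bottom-up construction builds exactly pvExt 10 0 (both sides are closed terms)
set_option maxRecDepth 100000 in
lemma pvAlt_subs_eq :
    (PySem.List.pyRange 9 0 (-1)).foldl
      (fun subs d => [[]] ++ subs.map (fun t => [d] ++ t) ++ PySem.List.slice subs (some 1) none)
      [[]] = pvExt 10 0 := by
  decide

-- ===== VERDICT (by name: the statement is the Claim_ definition above) =====
theorem combinationSum3_spec : Claim_equal_combinationSum3 := by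
  intro k n _
  unfold Spec_combinationSum3 combinationSum3 combinationSum3_alt
  rw [pvBT_eq k 10 0 (by norm_num) [] n []]
  rw [pvAlt_subs_eq]
  simp only [List.nil_append, List.length_nil, Nat.cast_zero, zero_add]
  simp [List.map_id']
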